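/- GENERATED by farm/mkstatement.py from design/units.tsv (unit `GifMakeMapObject.1`) and the assertions of Gif/Spec/Seg_GifMakeMapObject.lean — do not edit.
   THE STATEMENT of the proof unit `GifMakeMapObject.1`: segment 1 of `GifMakeMapObject` (22 instructions; entries 0x107900;
   exits 0x10793b,0x1079ac; ranges 0x107900-0x10793b,0x1079a7-0x1079ac)
   takes each of its entry assertions to one of its exit assertions (`Gif.Spec.GifMakeMapObject.Seg1`), given the contracts of its callees.
   What the names mean: ProgX/Base/Spec/Basic.lean (the shared hypotheses), Gif/Spec/Seg_GifMakeMapObject.lean (the assertions). The theorem to prove: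
   `theorem GifMakeMapObject_1_ok : Gif.Spec.GifMakeMapObject_1.Statement`. -/
import Gif.Code
import Gif.Dec.All
import Gif.Labels
import Gif.Spec.Alloc
import Gif.Spec.Seg_GifMakeMapObject
import ProgX.Base.Spec.Heap
namespace Gif.Spec.GifMakeMapObject_1
open X86 X86.User Asan

/-- The statement of unit `GifMakeMapObject.1`. -/
def Statement : Prop :=
  ∀ (Lay : Layout) (_hLay : Lay.hi = 0x1000000) (μ : Microarch) (_hμ : UserX.MicroOK μ) (u₀ : State)
    (_hcode : HasCodeNat Lay u₀ Gif.L.GifMakeMapObject.entry Gif.Code.code_GifMakeMapObject.nat Gif.L.GifMakeMapObject.size)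
    (_h_GifBitSize : Calls Lay μ ProgX.Base.WayInv (ProgX.Base.conv u₀) Gif.L.GifBitSize.entry Gif.Spec.GifBitSize.spec)
    (_h_malloc : ∀ (H : Heap) (rest : List Obj) (frames : List (Nat × FrameLayout)), Calls Lay μ ProgX.Base.WayInv (ProgX.Base.conv u₀) ProgX.Base.L.malloc.entry (ProgX.Base.Spec.malloc.spec H rest frames)),
    Gif.Spec.GifMakeMapObject.Seg1 Lay μ u₀

end Gif.Spec.GifMakeMapObject_1
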